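-- pv_equiv track=rewrite | github.com/melaniesubbiah/harmfulagendasnews | FRESH_dev/Rationale_Analysis/data/token_indexers/pretrained_transformer_indexer_simple.py | intra_word_tokenize_in_id
-- ===== SOURCE A (Python) =====
-- from typing import Dict, List, Tuple
--
-- def intra_word_tokenize_in_id(
--     tokens: List[List[int]], starting_offset: int = 0
-- ) -> Tuple[List[int], List[Tuple[int, int]], int]:
--
--     wordpieces: List[int] = []
--     offsets = []
--
--     cumulative = starting_offset
--
--     for token in tokens:
--         subword_wordpieces = token
--         wordpieces.extend(subword_wordpieces)
--         start_offset = cumulative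
--         cumulative += len(subword_wordpieces)
--         end_offset = cumulative  # exclusive end offset
--         offsets.append((start_offset, end_offset))
--
--     return wordpieces, offsets, cumulative
-- ===== SOURCE B (Python) =====
-- from itertools import accumulate
-- from typing import List, Tuple
--
-- def intra_word_tokenize_in_id(
--     tokens: List[List[int]], starting_offset: int = 0
-- ) -> Tuple[List[int], List[Tuple[int, int]], int]:
--     wordpieces = [w for t in tokens for w in t]
--     boundaries = list(accumulate((len(t) for t in tokens), initial=starting_offset))
--     offsets = list(zip(boundaries, boundaries[1:]))
--     return wordpieces, offsets, boundaries[-1]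
-- ===== Notes on version B (the rewrite author's own statement) =====
-- stated objective: alternative
-- what changed: Replaces the incremental running-counter loop with a table decomposition: flatten via a comprehension, prefix-sum boundaries via itertools.accumulate, and offsets by zipping consecutive boundaries.
import Mathlib
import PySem

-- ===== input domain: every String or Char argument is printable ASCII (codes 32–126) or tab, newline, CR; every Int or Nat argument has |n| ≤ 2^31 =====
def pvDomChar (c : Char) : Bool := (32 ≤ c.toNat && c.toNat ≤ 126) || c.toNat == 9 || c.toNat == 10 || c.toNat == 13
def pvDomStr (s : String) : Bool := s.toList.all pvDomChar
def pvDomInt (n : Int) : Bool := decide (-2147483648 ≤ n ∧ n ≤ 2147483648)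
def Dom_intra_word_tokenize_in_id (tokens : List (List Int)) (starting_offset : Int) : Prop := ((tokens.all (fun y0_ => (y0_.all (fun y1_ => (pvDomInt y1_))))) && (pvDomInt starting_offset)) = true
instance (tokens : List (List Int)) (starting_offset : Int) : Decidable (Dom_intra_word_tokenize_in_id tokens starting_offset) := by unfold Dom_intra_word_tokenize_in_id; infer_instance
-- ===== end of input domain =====

-- ===== PORT A =====
-- Header: B replaces A's running-counter loop by flatten + prefix-sum boundaries zipped pairwise (alternative decomposition, same cost).
def intra_word_tokenize_in_id (tokens : List (List Int)) (starting_offset : Int) : List Int × (List (Int × Int)) × Int :=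
  let st := tokens.foldl
    (fun st token =>
      (st.1 ++ token, st.2.1 ++ [(st.2.2, st.2.2 + (token.length : Int))], st.2.2 + (token.length : Int)))
    (([] : List Int), ([] : List (Int × Int)), starting_offset)
  st

-- ===== PORT B =====
def intra_word_tokenize_in_id_alt (tokens : List (List Int)) (starting_offset : Int) : List Int × (List (Int × Int)) × Int :=
  let boundaries := List.scanl (fun acc l => acc + l) starting_offset (tokens.map (fun t => (t.length : Int)))
  (tokens.flatten, boundaries.zip boundaries.tail, boundaries.getLastD starting_offset)

-- ===== PRECONDITION & SPEC =====
def Spec_intra_word_tokenize_in_id (tokens : List (List Int)) (starting_offset : Int) (out : List Int × (List (Int × Int)) × Int) : Prop := out = intra_word_tokenize_in_id_alt tokens starting_offset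
instance (tokens : List (List Int)) (starting_offset : Int) (out : List Int × (List (Int × Int)) × Int) : Decidable (Spec_intra_word_tokenize_in_id tokens starting_offset out) := by unfold Spec_intra_word_tokenize_in_id; infer_instance

-- ===== CLAIM (what is proved, stated in full; the proofs are below) =====
def Claim_equal_intra_word_tokenize_in_id : Prop := ∀ (tokens : List (List Int)) (starting_offset : Int), Dom_intra_word_tokenize_in_id tokens starting_offset → Spec_intra_word_tokenize_in_id tokens starting_offset (intra_word_tokenize_in_id tokens starting_offset)

-- ===== LEMMAS AND PROOFS =====

-- ===== VERDICT (by name: the statement is the Claim_ definition above) =====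
theorem getD_getLast?_cons_irrel (a : Int) (l : List Int) (d₁ d₂ : Int) :
    ((a :: l).getLast?).getD d₁ = ((a :: l).getLast?).getD d₂ := by
  induction l generalizing a with
  | nil => rfl
  | cons b bs ih => simpa [List.getLast?_cons_cons] using ih b

theorem iw_fold_eq (tokens : List (List Int)) :
    ∀ (wp : List Int) (offs : List (Int × Int)) (c : Int),
    tokens.foldl
      (fun st token =>
        (st.1 ++ token, st.2.1 ++ [(st.2.2, st.2.2 + (token.length : Int))], st.2.2 + (token.length : Int)))
      (wp, offs, c)
    = (wp ++ tokens.flatten,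
       offs ++ ((List.scanl (fun acc l => acc + l) c (tokens.map (fun t => (t.length : Int)))).zip
                (List.scanl (fun acc l => acc + l) c (tokens.map (fun t => (t.length : Int)))).tail),
       (List.scanl (fun acc l => acc + l) c (tokens.map (fun t => (t.length : Int)))).getLastD c) := by
  induction tokens with
  | nil => intro wp offs c; simp [List.scanl]
  | cons t ts ih =>
    intro wp offs c
    simp only [List.foldl_cons, ih, List.map_cons, List.scanl, List.flatten_cons]
    cases ts <;> simp [List.scanl] <;> exact getD_getLast?_cons_irrel _ _ _ _

theorem intra_word_tokenize_in_id_spec : Claim_equal_intra_word_tokenize_in_id := by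
  intro tokens starting_offset _
  unfold Spec_intra_word_tokenize_in_id intra_word_tokenize_in_id intra_word_tokenize_in_id_alt
  simp only [iw_fold_eq, List.nil_append]
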